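-- pv_equiv track=rewrite | github.com/niklasax/sample_buddy_ai | archive/llm_interface.py | fallback_search
-- ===== SOURCE A (Python) =====
-- from typing import Dict, List, Any
--
-- def fallback_search(query: str, samples: Dict[str, Dict]) -> List[Dict[str, Any]]:
--     """
--     Fallback keyword-based search when LLM is unavailable.
--
--     Args:
--         query: Search query
--         samples: Dictionary of audio samples
--
--     Returns:
--         List of matching sample dictionaries
--     """
--     query_terms = query.lower().split()
--     matches = []
--
--     for sample_id, sample in samples.items():
--         score = 0
--
--         # Check name
--         name = sample.get("name", "").lower()
--         for term in query_terms:
--             if term in name: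
--                 score += 3
--
--         # Check category
--         category = sample.get("category", "").lower()
--         for term in query_terms:
--             if term in category:
--                 score += 2
--
--         # Check mood
--         mood = sample.get("mood", "").lower()
--         for term in query_terms:
--             if term in mood:
--                 score += 2
--
--         if score > 0:
--             match = sample.copy()
--             match["search_score"] = score
--             matches.append(match)
--
--     # Sort by score
--     matches.sort(key=lambda x: x.get("search_score", 0), reverse=True)
--
--     # Remove scores from results
--     for match in matches:
--         if "search_score" in match:
--             del match["search_score"]
--
--     return matches[:10]  # Return top 10 matches
-- ===== SOURCE B (Python) =====
-- def fallback_search(query, samples):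
--     """Counting-sort selection: invert the loops (terms outer, samples inner)
--     to accumulate scores in a parallel array, bucket the matching samples by
--     score, and emit buckets from the highest score downwards -- no comparison
--     sort and no temporary 'search_score' key written into and deleted from
--     the returned copies."""
--     items = [dict(s) for s in samples.values()]
--     lows = [(s.get("name", "").lower(), s.get("category", "").lower(),
--              s.get("mood", "").lower()) for s in samples.values()]
--     scores = [0] * len(items)
--     for term in query.lower().split():
--         for i, (name, cat, mood) in enumerate(lows):
--             scores[i] += 3 * (term in name) + 2 * (term in cat) + 2 * (term in mood)
--     buckets = {}
--     for i, sc in enumerate(scores):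
--         if sc > 0:
--             buckets.setdefault(sc, []).append(i)
--     out = []
--     for sc in range(max(scores, default=0), 0, -1):
--         for i in buckets.get(sc, ()):
--             if len(out) == 10:
--                 return out
--             out.append(items[i])
--     return out
-- ===== Notes on version B (the rewrite author's own statement) =====
-- stated objective: alternative
-- what changed: B inverts the scoring loops (terms outer, a parallel score array inner) and replaces A's mutate-copies-with-a-temporary-'search_score'-key-then-comparison-sort-then-delete pipeline by a counting-sort selection: matching indices are bucketed by score in a dict and buckets are emitted from the highest score down until 10 results.
-- intended difference: On inputs where a sample that matches the query already contains a 'search_score' key, A silently deletes that key from the returned copy (it collides with A's temporary scoring key), while B returns the sample's entries intact, which is the intended non-destructive behaviour. — e.g. on fallback_search("a", [("s1", [("name", "a"), ("search_score", "x")])]): A returns [[("name", "a")]], B returns [[("name", "a"), ("search_score", "x")]]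
import Mathlib
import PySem

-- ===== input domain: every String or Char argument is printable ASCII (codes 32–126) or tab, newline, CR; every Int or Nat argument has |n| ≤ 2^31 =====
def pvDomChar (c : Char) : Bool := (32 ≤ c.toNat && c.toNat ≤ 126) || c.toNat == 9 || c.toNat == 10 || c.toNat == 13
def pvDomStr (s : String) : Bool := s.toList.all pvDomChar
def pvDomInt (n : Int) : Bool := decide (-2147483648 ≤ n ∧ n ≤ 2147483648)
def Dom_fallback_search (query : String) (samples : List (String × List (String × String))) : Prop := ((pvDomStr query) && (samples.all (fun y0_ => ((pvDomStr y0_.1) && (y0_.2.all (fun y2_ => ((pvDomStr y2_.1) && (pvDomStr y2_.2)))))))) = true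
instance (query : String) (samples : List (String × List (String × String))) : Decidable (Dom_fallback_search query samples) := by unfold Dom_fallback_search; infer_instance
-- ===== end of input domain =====

-- B replaces A's mutate-copies-with-a-temporary-'search_score'-key, comparison-sort, delete-the-key
-- pipeline by inverted scoring loops plus a counting-sort selection over score buckets; where a
-- matching sample already carries a 'search_score' key A destroys it and B keeps it (D_ below).

-- The Python argument is a dict[str, dict[str, str]]; the association-list argument is read the
-- way Python's dict(...) reads it (later duplicate keys overwrite in place, PySem.Dict.ofList).
-- This input interpretation is shared by both ports.
def pvNormalize (samples : List (String × List (String × String))) :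
    PySem.Dict String (PySem.Dict String String) :=
  PySem.Dict.ofList (samples.map (fun p => (p.1, PySem.Dict.ofList p.2)))

-- ===== PORT A =====
-- A's intermediate 'match' dict holds str values plus one int value under 'search_score';
-- that heterogeneous Python dict is modelled as Dict String (Int ⊕ String).
def pvToSum (s : PySem.Dict String String) : PySem.Dict String (Int ⊕ String) :=
  PySem.Dict.mk (s.items.map (fun q => (q.1, Sum.inr q.2)))

def pvSumKey (v : Int ⊕ String) : Int :=
  match v with | .inl n => n | .inr _ => 0

def pvSumStr (v : Int ⊕ String) : String :=
  match v with | .inl _ => "" | .inr s => s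

def pvScoreA (terms : List String) (sample : PySem.Dict String String) : Int :=
  let name := PySem.Str.lower (sample.getD "name" "")
  let s1 := terms.foldl (fun sc t => if PySem.Str.isIn t name then sc + 3 else sc) 0
  let category := PySem.Str.lower (sample.getD "category" "")
  let s2 := terms.foldl (fun sc t => if PySem.Str.isIn t category then sc + 2 else sc) s1
  let mood := PySem.Str.lower (sample.getD "mood" "")
  terms.foldl (fun sc t => if PySem.Str.isIn t mood then sc + 2 else sc) s2

def fallback_search (query : String) (samples : List (String × List (String × String))) : List (List (String × String)) :=
  let query_terms := PySem.Str.split₀ (PySem.Str.lower query)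
  let matchesL : List (PySem.Dict String (Int ⊕ String)) :=
    (pvNormalize samples).items.foldl (fun acc p =>
      let score := pvScoreA query_terms p.2
      if 0 < score then
        acc ++ [(pvToSum p.2).insert "search_score" (Sum.inl score)]
      else acc) []
  let sortedM := PySem.List.sorted matchesL (fun m => pvSumKey (m.getD "search_score" (Sum.inl 0))) true
  let cleaned := sortedM.map (fun m => if m.contains "search_score" then m.erase "search_score" else m)
  (PySem.List.slice cleaned none (some 10)).map (fun m => m.items.map (fun q => (q.1, pvSumStr q.2)))

-- ===== PORT B =====
-- '(name, category, mood)' lowered triple of one sample ('lows' entries in Source B)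
def pvTriple (s : PySem.Dict String String) : String × String × String :=
  (PySem.Str.lower (s.getD "name" ""),
   PySem.Str.lower (s.getD "category" ""),
   PySem.Str.lower (s.getD "mood" ""))

-- '3 * (term in name) + 2 * (term in cat) + 2 * (term in mood)'
def pvTermScore (t : String) (l : String × String × String) : Int :=
  3 * (if PySem.Str.isIn t l.1 then 1 else 0)
    + 2 * (if PySem.Str.isIn t l.2.1 then 1 else 0)
    + 2 * (if PySem.Str.isIn t l.2.2 then 1 else 0)

def fallback_search_alt (query : String) (samples : List (String × List (String × String))) : List (List (String × String)) :=
  let vals := (pvNormalize samples).values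
  let items := vals.map (fun s => s.items)          -- [dict(s) for s in samples.values()]
  let lows := vals.map pvTriple
  let scores0 : List Int := List.replicate items.length 0
  -- 'for term in ...: for i, (...) in enumerate(lows): scores[i] += ...' (in-place updates as zipWith)
  let scores := (PySem.Str.split₀ (PySem.Str.lower query)).foldl
      (fun sc term => List.zipWith (fun s l => s + pvTermScore term l) sc lows) scores0
  -- 'buckets.setdefault(sc, []).append(i)'
  let buckets := (PySem.List.enumerate scores).foldl
      (fun d p => if 0 < p.2 then d.modify p.2 [] (fun b => b ++ [p.1]) else d)
      (PySem.Dict.empty : PySem.Dict Int (List Int))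
  -- 'for sc in range(max(scores, default=0), 0, -1): for i in buckets.get(sc, ()): ...'
  -- the early 'return out' at len(out) == 10 is the no-op continuation of the fold
  (PySem.List.pyRange (PySem.List.maxD scores (fun x => x) 0) 0 (-1)).foldl
    (fun out sc => (buckets.getD sc []).foldl
      (fun out i => if out.length == 10 then out else out ++ [PySem.List.pyGetD items i []]) out) []

-- ===== PRECONDITION & SPEC =====
-- On inputs where a sample already contains a 'search_score' key and matches the query, A silently
-- deletes that key from the returned copy (it collides with A's temporary scoring key), while B
-- returns the sample's entries intact, which is the intended non-destructive behaviour.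
def D_fallback_search (query : String) (samples : List (String × List (String × String))) : Prop :=
  ∃ p ∈ (pvNormalize samples).items,
    p.2.contains "search_score" = true ∧
    ∃ t ∈ PySem.Str.split₀ (PySem.Str.lower query),
      (PySem.Str.isIn t (PySem.Str.lower (p.2.getD "name" "")) = true ∨
       PySem.Str.isIn t (PySem.Str.lower (p.2.getD "category" "")) = true ∨
       PySem.Str.isIn t (PySem.Str.lower (p.2.getD "mood" "")) = true)

instance (query : String) (samples : List (String × List (String × String))) : Decidable (D_fallback_search query samples) := by unfold D_fallback_search; infer_instance

def Spec_fallback_search (query : String) (samples : List (String × List (String × String))) (out : List (List (String × String))) : Prop := ¬ D_fallback_search query samples → out = fallback_search_alt query samples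
instance (query : String) (samples : List (String × List (String × String))) (out : List (List (String × String))) : Decidable (Spec_fallback_search query samples out) := by unfold Spec_fallback_search; infer_instance

def pvDiffWitness_fallback_search : String × (List (String × List (String × String))) :=
  ("a", [("s1", [("name", "a"), ("search_score", "x")])])
def pvDiffWitnessOut_fallback_search : (List (List (String × String))) × (List (List (String × String))) :=
  ([[("name", "a")]], [[("name", "a"), ("search_score", "x")]])

-- ===== CLAIM (what is proved, stated in full; the proofs are below) =====
def Claim_unchanged_fallback_search : Prop := ∀ (query : String) (samples : List (String × List (String × String))), Dom_fallback_search query samples → Spec_fallback_search query samples (fallback_search query samples)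
def Claim_changed_fallback_search : Prop := Dom_fallback_search (pvDiffWitness_fallback_search.1) (pvDiffWitness_fallback_search.2) ∧ D_fallback_search (pvDiffWitness_fallback_search.1) (pvDiffWitness_fallback_search.2) ∧ fallback_search (pvDiffWitness_fallback_search.1) (pvDiffWitness_fallback_search.2) = pvDiffWitnessOut_fallback_search.1 ∧ fallback_search_alt (pvDiffWitness_fallback_search.1) (pvDiffWitness_fallback_search.2) = pvDiffWitnessOut_fallback_search.2 ∧ pvDiffWitnessOut_fallback_search.1 ≠ pvDiffWitnessOut_fallback_search.2

-- ===== LEMMAS AND PROOFS =====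

-- the per-sample total score, shared reference point of both proofs
def pvScore (terms : List String) (s : PySem.Dict String String) : Int :=
  (terms.map (fun t => pvTermScore t (pvTriple s))).sum

-- the same total in the 3/2/2 if-form A's three folds produce
def pvScoreSum (terms : List String) (s : PySem.Dict String String) : Int :=
  (terms.map (fun t =>
    ((if PySem.Str.isIn t (PySem.Str.lower (s.getD "name" "")) then (3:Int) else 0)
      + (if PySem.Str.isIn t (PySem.Str.lower (s.getD "category" "")) then 2 else 0))
      + (if PySem.Str.isIn t (PySem.Str.lower (s.getD "mood" "")) then 2 else 0))).sum

theorem pvScore_eq_sum (terms : List String) (s : PySem.Dict String String) :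
    pvScore terms s = pvScoreSum terms s := by
  unfold pvScore pvScoreSum
  apply congrArg
  apply List.map_congr_left
  intro t _
  simp only [pvTermScore, pvTriple]
  split_ifs <;> ring

theorem pvFoldIf (f : String → Prop) [DecidablePred f] (c : Int) (l : List String) :
    ∀ a : Int, l.foldl (fun sc t => if f t then sc + c else sc) a
      = a + (l.map (fun t => if f t then c else 0)).sum := by
  induction l with
  | nil => simp
  | cons h tl ih => intro a; by_cases hf : f h <;> simp [hf, ih] <;> ring

theorem pvScoreA_eq (terms : List String) (s : PySem.Dict String String) :
    pvScoreA terms s = pvScore terms s := by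
  rw [pvScore_eq_sum]
  simp only [pvScoreA, pvScoreSum, pvFoldIf, PySem.List.sum_map_add_int]
  ring

theorem pvScoreSum_pos_iff (terms : List String) (s : PySem.Dict String String) :
    0 < pvScoreSum terms s ↔
      ∃ t ∈ terms,
        (PySem.Str.isIn t (PySem.Str.lower (s.getD "name" "")) = true ∨
         PySem.Str.isIn t (PySem.Str.lower (s.getD "category" "")) = true ∨
         PySem.Str.isIn t (PySem.Str.lower (s.getD "mood" "")) = true) := by
  simp only [pvScoreSum]
  induction terms with
  | nil => simp
  | cons h tl ih =>
    have hnn : (0:Int) ≤ (tl.map (fun t =>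
        ((if PySem.Str.isIn t (PySem.Str.lower (s.getD "name" "")) then (3:Int) else 0)
          + (if PySem.Str.isIn t (PySem.Str.lower (s.getD "category" "")) then 2 else 0))
          + (if PySem.Str.isIn t (PySem.Str.lower (s.getD "mood" "")) then 2 else 0))).sum := by
      apply List.sum_nonneg; intro x hx
      simp only [List.mem_map] at hx
      obtain ⟨t, _, rfl⟩ := hx
      split_ifs <;> norm_num
    simp only [List.map_cons, List.sum_cons, List.mem_cons]
    constructor
    · intro hp
      by_cases hch : (PySem.Str.isIn h (PySem.Str.lower (s.getD "name" "")) = true ∨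
          PySem.Str.isIn h (PySem.Str.lower (s.getD "category" "")) = true ∨
          PySem.Str.isIn h (PySem.Str.lower (s.getD "mood" "")) = true)
      · exact ⟨h, Or.inl rfl, hch⟩
      · push Not at hch
        obtain ⟨c1, c2, c3⟩ := hch
        rw [if_neg c1, if_neg c2, if_neg c3] at hp
        obtain ⟨t, ht, hC⟩ := ih.mp (by omega)
        exact ⟨t, Or.inr ht, hC⟩
    · rintro ⟨t, rfl | ht, hC⟩
      · split_ifs with a b c
        all_goals first | omega | (exfalso; rcases hC with c | c | c <;> simp_all)
      · have := ih.mpr ⟨t, ht, hC⟩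
        split_ifs <;> omega

theorem pvScore_pos_iff (terms : List String) (s : PySem.Dict String String) :
    0 < pvScore terms s ↔
      ∃ t ∈ terms,
        (PySem.Str.isIn t (PySem.Str.lower (s.getD "name" "")) = true ∨
         PySem.Str.isIn t (PySem.Str.lower (s.getD "category" "")) = true ∨
         PySem.Str.isIn t (PySem.Str.lower (s.getD "mood" "")) = true) := by
  rw [pvScore_eq_sum]; exact pvScoreSum_pos_iff terms s

theorem pvToSum_contains (s : PySem.Dict String String) (k : String) :
    (pvToSum s).contains k = s.contains k := by
  simp [pvToSum, PySem.Dict.contains, List.any_map, Function.comp_def]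

theorem pvErase_insert (s : PySem.Dict String String) (n : Int)
    (h : s.contains "search_score" = false) :
    ((pvToSum s).insert "search_score" (Sum.inl n)).erase "search_score" = pvToSum s := by
  have h2 : (pvToSum s).contains "search_score" = false := by rw [pvToSum_contains, h]
  apply PySem.Dict.ext
  rw [PySem.Dict.erase, PySem.Dict.items_insert_of_not_contains _ _ h2]
  simp only [List.filter_append]
  have hk : ∀ p ∈ (pvToSum s).items, (!p.1 == "search_score") = true := by
    intro p hp
    simp only [PySem.Dict.contains, List.any_eq_false] at h2
    simp [h2 p hp]
  rw [List.filter_eq_self.mpr hk]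
  simp

theorem pvInsertBy_map {α β : Type} (F : α → β) (bA : β → β → Bool) (bB : α → α → Bool)
    (h : ∀ a b, bA (F a) (F b) = bB a b) (x : α) (ys : List α) :
    PySem.List.insertBy bA (F x) (ys.map F) = (PySem.List.insertBy bB x ys).map F := by
  induction ys with
  | nil => simp [PySem.List.insertBy]
  | cons y ys ih =>
    simp only [List.map_cons, PySem.List.insertBy, h]
    cases hb : bB x y <;> simp [ih]

theorem pvSorted_map {α β : Type} (F : α → β) (kA : β → Int) (kB : α → Int)
    (h : ∀ a, kA (F a) = kB a) (l : List α) :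
    PySem.List.sorted (l.map F) kA true = (PySem.List.sorted l kB true).map F := by
  rw [PySem.List.sorted_rev_eq_foldl_insertBy, PySem.List.sorted_rev_eq_foldl_insertBy]
  suffices H : ∀ acc : List α,
      (l.map F).foldl (fun acc x => PySem.List.insertBy (fun a b => decide (kA b < kA a)) x acc) (acc.map F)
      = (l.foldl (fun acc x => PySem.List.insertBy (fun a b => decide (kB b < kB a)) x acc) acc).map F by
    simpa using H []
  induction l with
  | nil => intro acc; simp
  | cons z zs ih =>
    intro acc
    simp only [List.map_cons, List.foldl_cons]
    rw [pvInsertBy_map F _ (fun a b => decide (kB b < kB a)) (by intro a b; simp [h]) z acc]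
    exact ih _

theorem pvMatches_eq (terms : List String) (l : List (String × PySem.Dict String String)) :
    ∀ acc : List (PySem.Dict String (Int ⊕ String)),
      l.foldl (fun acc p =>
        if 0 < pvScoreA terms p.2 then
          acc ++ [(pvToSum p.2).insert "search_score" (Sum.inl (pvScoreA terms p.2))]
        else acc) acc
      = acc ++ (l.filter (fun p => decide (0 < pvScoreA terms p.2))).map
          (fun p => (pvToSum p.2).insert "search_score" (Sum.inl (pvScoreA terms p.2))) := by
  induction l with
  | nil => intro acc; simp
  | cons p l ih =>
    intro acc
    simp only [List.foldl_cons, List.filter_cons]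
    by_cases hp : 0 < pvScoreA terms p.2
    · simp [hp, ih]
    · simp [hp, ih]

theorem pvToSum_items_back (s : PySem.Dict String String) :
    (pvToSum s).items.map (fun q => (q.1, pvSumStr q.2)) = s.items := by
  simp [pvToSum, pvSumStr, List.map_map, Function.comp_def]

-- ---- A reduced to: take 10 of the stable descending sort of the scored pairs ----

set_option maxHeartbeats 1000000 in
theorem pvA_eq (query : String) (samples : List (String × List (String × String)))
    (hD : ¬ D_fallback_search query samples) :
    fallback_search query samples
      = ((PySem.List.sorted
            (((pvNormalize samples).values.filter
                (fun s => decide (0 < pvScore (PySem.Str.split₀ (PySem.Str.lower query)) s))).map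
              (fun s => (pvScore (PySem.Str.split₀ (PySem.Str.lower query)) s, s)))
            (fun t => t.1) true).take 10).map (fun t => t.2.items) := by
  -- the scored pairs over values, rewritten as scored pairs over the dict's items
  have hscd : (((pvNormalize samples).values.filter
        (fun s => decide (0 < pvScore (PySem.Str.split₀ (PySem.Str.lower query)) s))).map
      (fun s => (pvScore (PySem.Str.split₀ (PySem.Str.lower query)) s, s)))
      = ((pvNormalize samples).items.filter
          (fun p => decide (0 < pvScore (PySem.Str.split₀ (PySem.Str.lower query)) p.2))).map
        (fun p => (pvScore (PySem.Str.split₀ (PySem.Str.lower query)) p.2, p.2)) := by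
    rw [show (pvNormalize samples).values = (pvNormalize samples).items.map (fun p => p.2) from rfl,
      List.filter_map, List.map_map]
    rfl
  rw [hscd]
  simp only [fallback_search]
  rw [pvMatches_eq]
  simp only [pvScoreA_eq, List.nil_append]
  generalize hfl : (pvNormalize samples).items.filter
      (fun p => decide (0 < pvScore (PySem.Str.split₀ (PySem.Str.lower query)) p.2)) = fl
  have hAB : fl.map (fun p => (pvToSum p.2).insert "search_score"
        (Sum.inl (pvScore (PySem.Str.split₀ (PySem.Str.lower query)) p.2)))
      = (fl.map (fun p : String × PySem.Dict String String =>
            (pvScore (PySem.Str.split₀ (PySem.Str.lower query)) p.2, p.2))).map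
          (fun t : Int × PySem.Dict String String => (pvToSum t.2).insert "search_score" (Sum.inl t.1)) := by
    rw [List.map_map]
    simp only [Function.comp_def]
  rw [hAB]
  rw [pvSorted_map (fun t : Int × PySem.Dict String String => (pvToSum t.2).insert "search_score" (Sum.inl t.1))
      _ (fun t => t.1)
      (by intro a; simp [PySem.Dict.getD_insert_self, pvSumKey])]
  rw [List.map_map]
  -- pointwise cleaning: the temporary key is deleted again outside D_
  rw [List.map_congr_left (f := ((fun m : PySem.Dict String (Int ⊕ String) =>
        if m.contains "search_score" then m.erase "search_score" else m) ∘
        (fun t : Int × PySem.Dict String String => (pvToSum t.2).insert "search_score" (Sum.inl t.1))))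
      (g := fun t : Int × PySem.Dict String String => pvToSum t.2) ?_]
  · rw [PySem.List.slice_to _ (by norm_num : (0:Int) ≤ 10)]
    rw [← List.map_take, List.map_map]
    apply List.map_congr_left
    intro t _
    simp only [Function.comp_def, pvToSum_items_back]
  · intro t ht
    rw [PySem.List.mem_sorted] at ht
    rw [List.mem_map] at ht
    obtain ⟨p, hpfl, rfl⟩ := ht
    rw [← hfl, List.mem_filter] at hpfl
    obtain ⟨hpmem, hppos⟩ := hpfl
    have hpos : 0 < pvScore (PySem.Str.split₀ (PySem.Str.lower query)) p.2 := by
      simpa using hppos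
    have hcont : p.2.contains "search_score" = false := by
      by_contra hc
      apply hD
      refine ⟨p, hpmem, ?_, ?_⟩
      · revert hc; cases p.2.contains "search_score" <;> simp
      · exact (pvScore_pos_iff _ _).mp hpos
    simp only [Function.comp_def]
    rw [if_pos (PySem.Dict.contains_insert_self _ _ _)]
    exact pvErase_insert p.2 _ hcont

-- ---- stable descending sort = concatenation of score buckets in descending order ----

-- filters at each key value determine a weakly descending list
theorem pvEqOfFilters {α : Type} (key : α → Int) :
    ∀ (ys zs : List α), ys.Pairwise (fun a b => key b ≤ key a) → zs.Pairwise (fun a b => key b ≤ key a) →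
      (∀ v : Int, ys.filter (fun x => decide (key x = v)) = zs.filter (fun x => decide (key x = v))) →
      ys = zs := by
  intro ys
  induction ys with
  | nil =>
    intro zs _ _ hf
    cases zs with
    | nil => rfl
    | cons b zs' =>
      exfalso
      have h := (hf (key b)).symm
      simp [List.filter_cons] at h
  | cons a ys' ih =>
    intro zs hy hz hf
    cases zs with
    | nil =>
      exfalso
      have h := hf (key a)
      simp [List.filter_cons] at h
    | cons b zs' =>
      obtain ⟨ha1, hy'⟩ := List.pairwise_cons.mp hy
      obtain ⟨hb1, hz'⟩ := List.pairwise_cons.mp hz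
      have hab : key a = key b := by
        rcases lt_trichotomy (key a) (key b) with h | h | h
        · exfalso
          have hv := hf (key b)
          have hLnil : (a :: ys').filter (fun x => decide (key x = key b)) = [] := by
            rw [List.filter_eq_nil_iff]
            intro x hx
            rcases List.mem_cons.mp hx with rfl | hx'
            · simp; omega
            · have := ha1 x hx'; simp; omega
          rw [hLnil] at hv
          simp [List.filter_cons] at hv
        · exact h
        · exfalso
          have hv := hf (key a)
          have hRnil : (b :: zs').filter (fun x => decide (key x = key a)) = [] := by
            rw [List.filter_eq_nil_iff]
            intro x hx
            rcases List.mem_cons.mp hx with rfl | hx'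
            · simp; omega
            · have := hb1 x hx'; simp; omega
          rw [hRnil] at hv
          simp [List.filter_cons] at hv
      have hv := hf (key a)
      rw [List.filter_cons, List.filter_cons, if_pos (by simp), if_pos (by simp [hab])] at hv
      injection hv with hhead htails
      subst hhead
      congr 1
      apply ih zs' hy' hz'
      intro v
      by_cases hva : v = key a
      · subst hva; exact htails
      · have h2 := hf v
        rw [List.filter_cons, List.filter_cons] at h2
        simp only [decide_eq_true_eq] at h2
        rw [if_neg (by omega), if_neg (by rw [← hab]; omega)] at h2
        exact h2

-- inserting x leaves every key-class other than x's untouched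
theorem pvInsertBy_filter_ne {α : Type} (key : α → Int) (x : α) (v : Int) (hv : v ≠ key x) :
    ∀ acc : List α,
      (PySem.List.insertBy (fun a b => decide (key b < key a)) x acc).filter (fun y => decide (key y = v))
        = acc.filter (fun y => decide (key y = v)) := by
  intro acc
  induction acc with
  | nil =>
    simp only [PySem.List.insertBy, List.filter_cons, List.filter_nil]
    rw [if_neg (by simp; omega)]
  | cons y ys ih =>
    simp only [PySem.List.insertBy]
    by_cases h : key y < key x
    · rw [if_pos (by simpa using h)]
      rw [List.filter_cons, List.filter_cons]
      rw [if_neg (by simp; omega)]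
    · rw [if_neg (by simpa using h)]
      rw [List.filter_cons, List.filter_cons, ih]

-- inserting x appends it at the end of its own key-class (stability of insertion)
theorem pvInsertBy_filter_eq {α : Type} (key : α → Int) (x : α) :
    ∀ acc : List α, acc.Pairwise (fun a b => key b ≤ key a) →
      (PySem.List.insertBy (fun a b => decide (key b < key a)) x acc).filter (fun y => decide (key y = key x))
        = acc.filter (fun y => decide (key y = key x)) ++ [x] := by
  intro acc
  induction acc with
  | nil =>
    intro _
    simp [PySem.List.insertBy, List.filter_cons]
  | cons y ys ih =>
    intro hacc
    obtain ⟨hy1, hys⟩ := List.pairwise_cons.mp hacc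
    simp only [PySem.List.insertBy]
    by_cases h : key y < key x
    · rw [if_pos (by simpa using h)]
      have hnil : (y :: ys).filter (fun z => decide (key z = key x)) = [] := by
        rw [List.filter_eq_nil_iff]
        intro z hz
        rcases List.mem_cons.mp hz with rfl | hz'
        · simp; omega
        · have := hy1 z hz'; simp; omega
      rw [hnil, List.filter_cons, if_pos (by simp)]
      rw [hnil]
      simp
    · rw [if_neg (by simpa using h)]
      rw [List.filter_cons, List.filter_cons, ih hys]
      by_cases hk : key y = key x <;> simp [hk]

-- stability of PySem's sort: the sort preserves each key-class as a subsequence in order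
theorem pvSorted_filter_key {α : Type} (key : α → Int) (l : List α) (v : Int) :
    (PySem.List.sorted l key true).filter (fun x => decide (key x = v))
      = l.filter (fun x => decide (key x = v)) := by
  induction l using List.reverseRecOn with
  | nil => rw [PySem.List.sorted_rev_eq_foldl_insertBy]; rfl
  | append_singleton l x ih =>
    have hsnoc : PySem.List.sorted (l ++ [x]) key true
        = PySem.List.insertBy (fun a b => decide (key b < key a)) x (PySem.List.sorted l key true) := by
      rw [PySem.List.sorted_rev_eq_foldl_insertBy, PySem.List.sorted_rev_eq_foldl_insertBy,
        List.foldl_append, List.foldl_cons, List.foldl_nil]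
    rw [hsnoc]
    by_cases hv : v = key x
    · subst hv
      rw [pvInsertBy_filter_eq key x _ (PySem.List.sorted_pairwise_rev l key), ih,
        List.filter_append, List.filter_cons, if_pos (by simp), List.filter_nil]
    · rw [pvInsertBy_filter_ne key x v hv, ih, List.filter_append, List.filter_cons,
        if_neg (by simp; omega), List.filter_nil, List.append_nil]

-- pairwise over a flatMap from block-wise and cross-block facts
theorem pvPairwise_flatMap {α : Type} (R : α → α → Prop) (g : Int → List α) :
    ∀ L : List Int, L.Pairwise (fun s1 s2 => ∀ x ∈ g s1, ∀ y ∈ g s2, R x y) →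
      (∀ s ∈ L, (g s).Pairwise R) → (L.flatMap g).Pairwise R := by
  intro L
  induction L with
  | nil => intro _ _; simp
  | cons c L ih =>
    intro h1 h2
    obtain ⟨hc, h1'⟩ := List.pairwise_cons.mp h1
    rw [List.flatMap_cons]
    apply List.pairwise_append.mpr
    refine ⟨h2 c (List.mem_cons_self ..), ih h1' (fun s hs => h2 s (List.mem_cons_of_mem _ hs)), ?_⟩
    intro x hx y hy
    obtain ⟨s, hs, hys⟩ := List.mem_flatMap.mp hy
    exact hc s hs x hx y hys

theorem pvFlatMap_if_not_mem {α : Type} (F : List α) (v : Int) :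
    ∀ L : List Int, v ∉ L → (L.flatMap (fun sc => if v = sc then F else [])) = [] := by
  intro L
  induction L with
  | nil => intro _; rfl
  | cons c L ih =>
    intro hv
    rw [List.flatMap_cons, if_neg (by intro h; exact hv (h ▸ List.mem_cons_self ..)),
      List.nil_append, ih (fun h => hv (List.mem_cons_of_mem _ h))]

theorem pvFlatMap_if_single {α : Type} (F : List α) (v : Int) :
    ∀ L : List Int, L.Nodup → v ∈ L → (L.flatMap (fun sc => if v = sc then F else [])) = F := by
  intro L
  induction L with
  | nil => intro _ h; cases h
  | cons c L ih =>
    intro hnd hv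
    rw [List.flatMap_cons]
    by_cases hc : v = c
    · rw [if_pos hc]
      rw [pvFlatMap_if_not_mem F v L (by subst hc; exact (List.nodup_cons.mp hnd).1), List.append_nil]
    · rw [if_neg hc, List.nil_append]
      exact ih (List.nodup_cons.mp hnd).2 (by rcases List.mem_cons.mp hv with h | h; exact absurd h hc; exact h)

theorem pvSorted_eq_buckets {α : Type} (key : α → Int) (l : List α) (M : Int)
    (hlb : ∀ x ∈ l, 0 < key x) (hub : ∀ x ∈ l, key x ≤ M) :
    PySem.List.sorted l key true
      = (PySem.List.pyRange M 0 (-1)).flatMap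
          (fun sc => l.filter (fun x => decide (key x = sc))) := by
  apply pvEqOfFilters key
  · exact PySem.List.sorted_pairwise_rev l key
  · apply pvPairwise_flatMap
    · have hp : (PySem.List.pyRange M 0 (-1)).Pairwise (fun s1 s2 => s2 < s1) := by
        rw [PySem.List.pyRange_neg_one_eq_reverse]
        exact List.pairwise_reverse.mpr (PySem.List.pairwise_lt_pyRange_one _ _)
      apply hp.imp ?_
      intro s1 s2 h12 x hx y hy
      have hxk := List.of_mem_filter hx
      have hyk := List.of_mem_filter hy
      simp only [decide_eq_true_eq] at hxk hyk
      omega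
    · intro s _
      apply List.pairwise_of_forall_mem_list
      intro a ha b hb
      have hak := List.of_mem_filter ha
      have hbk := List.of_mem_filter hb
      simp only [decide_eq_true_eq] at hak hbk
      omega
  · intro v
    rw [pvSorted_filter_key, List.filter_flatMap]
    have hcollapse : (fun sc => (l.filter (fun x => decide (key x = sc))).filter (fun x => decide (key x = v)))
        = (fun sc => if v = sc then l.filter (fun x => decide (key x = v)) else []) := by
      funext sc
      by_cases h : v = sc
      · subst h
        rw [if_pos rfl, List.filter_filter]
        apply List.filter_congr
        intro x _
        simp [Bool.and_self]
      · rw [if_neg h, List.filter_eq_nil_iff]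
        intro x hx
        have := List.of_mem_filter hx
        simp only [decide_eq_true_eq] at this ⊢
        omega
    rw [hcollapse]
    by_cases hvL : v ∈ PySem.List.pyRange M 0 (-1)
    · rw [pvFlatMap_if_single _ v _ ?_ hvL]
      rw [PySem.List.pyRange_neg_one_eq_reverse]
      exact List.nodup_reverse.mpr (PySem.List.nodup_pyRange_one _ _)
    · rw [pvFlatMap_if_not_mem _ v _ hvL, List.filter_eq_nil_iff]
      intro x hx hk
      apply hvL
      rw [PySem.List.mem_pyRange_neg_one]
      simp only [decide_eq_true_eq] at hk
      have := hlb x hx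
      have := hub x hx
      omega

-- ---- B reduced to: take 10 of the bucket concatenation, mapped to items ----

theorem pvCapFold (l : List (List (String × String))) :
    ∀ acc : List (List (String × String)), acc.length ≤ 10 →
      l.foldl (fun out x => if out.length == 10 then out else out ++ [x]) acc
        = acc ++ l.take (10 - acc.length) := by
  induction l with
  | nil => intro acc _; simp
  | cons x l ih =>
    intro acc hacc
    rw [List.foldl_cons]
    by_cases h : acc.length = 10
    · rw [if_pos (by simp [h]), ih acc hacc, h]
      simp
    · rw [if_neg (by simp [h])]
      rw [ih (acc ++ [x]) (by simp; omega)]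
      have h10 : 10 - acc.length = (10 - (acc ++ [x]).length) + 1 := by simp; omega
      rw [h10, List.take_succ_cons]
      simp

-- enumerate commutes with map on the values
theorem pvEnumerate_map {α β : Type} (f : α → β) (xs : List α) :
    ∀ s : Int, PySem.List.enumerate (xs.map f) s
      = (PySem.List.enumerate xs s).map (fun p => (p.1, f p.2)) := by
  induction xs with
  | nil => intro s; simp [PySem.List.enumerate_nil]
  | cons x xs ih =>
    intro s
    rw [List.map_cons, PySem.List.enumerate_cons, PySem.List.enumerate_cons, List.map_cons, ih]

-- the inverted scoring loop computes, per sample, the sum over terms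
theorem pvLoopInv {β : Type} (lows : List β) (step : String → β → Int) :
    ∀ (terms : List String) (g : β → Int),
      terms.foldl (fun sc term => List.zipWith (fun s l => s + step term l) sc lows) (lows.map g)
      = lows.map (fun l => g l + (terms.map (fun t => step t l)).sum) := by
  intro terms
  induction terms with
  | nil => intro g; simp
  | cons t ts ih =>
    intro g
    simp only [List.foldl_cons]
    rw [List.zipWith_map_left, List.zipWith_self, ih (fun l => g l + step t l)]
    simp only [List.map_cons, List.sum_cons]
    apply List.map_congr_left
    intro l _
    ring

theorem pvBlock_eq (T : List String) (vals : List (PySem.Dict String String)) (sc : Int) (hsc : 0 < sc) :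
    (((PySem.List.enumerate (vals.map (pvScore T))).filter
        (fun p => (p.2 == sc) && decide (0 < p.2))).map (fun p => p.1)).map
      (fun i => PySem.List.pyGetD (vals.map (fun s => s.items)) i [])
    = (((vals.filter (fun s => decide (0 < pvScore T s))).map
          (fun s => (pvScore T s, s))).filter (fun t => decide (t.1 = sc))).map
        (fun t => t.2.items) := by
  rw [pvEnumerate_map (pvScore T) vals 0, List.filter_map, List.map_map, List.map_map]
  -- LHS: elements of the filtered enumerate satisfy p = (k, vals[k]); index back into items
  rw [List.map_congr_left (g := fun p : Int × PySem.Dict String String => p.2.items) ?_]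
  · -- predicate: for 0 < sc the 0 < score conjunct is implied
    rw [List.filter_congr (q := fun p : Int × PySem.Dict String String => decide (pvScore T p.2 = sc))
        (fun p _ => by simp only [Function.comp_def, Bool.beq_eq_decide_eq]; by_cases h : pvScore T p.2 = sc <;> simp [h] <;> omega)]
    -- LHS = (vals.filter (score = sc)).map items
    have hL : ((PySem.List.enumerate vals).filter
          (fun p => decide (pvScore T p.2 = sc))).map (fun p : Int × PySem.Dict String String => p.2.items)
        = ((vals.filter (fun s => decide (pvScore T s = sc))).map (fun s => s.items)) := by
      have : ((PySem.List.enumerate vals).filter (fun p => decide (pvScore T p.2 = sc))).map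
            (fun p : Int × PySem.Dict String String => p.2.items)
          = ((((PySem.List.enumerate vals).map (fun p => p.2)).filter
              (fun s => decide (pvScore T s = sc))).map (fun s => s.items)) := by
        rw [List.filter_map, List.map_map]
        rfl
      rw [this, PySem.List.map_snd_enumerate]
    rw [hL]
    -- RHS reduces to the same
    rw [List.filter_map, List.filter_filter, List.map_map]
    simp only [Function.comp_def]
    refine congrArg (List.map fun s : PySem.Dict String String => s.items) ?_
    exact (List.filter_congr
      (fun s _ => by by_cases h : pvScore T s = sc <;> simp [h, hsc] <;> omega)).symm
  · intro p hp
    have hmem := List.mem_of_mem_filter hp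
    obtain ⟨k, hk, rfl⟩ := (PySem.List.mem_enumerate_iff vals 0 _).mp hmem
    simp only [Function.comp_def]
    have h0 : (0:Int) ≤ 0 + (k:Int) := by omega
    have h1 : (0:Int) + (k:Int) < ((vals.map (fun s => s.items)).length : Int) := by
      simp; omega
    rw [PySem.List.pyGetD_eq_getElem _ _ h0 h1]
    simp [hk]

theorem pvB_eq (query : String) (samples : List (String × List (String × String))) :
    fallback_search_alt query samples
      = ((((PySem.List.pyRange
              (PySem.List.maxD ((pvNormalize samples).values.map
                  (pvScore (PySem.Str.split₀ (PySem.Str.lower query)))) (fun x => x) 0) 0 (-1)).flatMap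
            (fun sc =>
              (((pvNormalize samples).values.filter
                  (fun s => decide (0 < pvScore (PySem.Str.split₀ (PySem.Str.lower query)) s))).map
                (fun s => (pvScore (PySem.Str.split₀ (PySem.Str.lower query)) s, s))).filter
                (fun t => decide (t.1 = sc)))).map (fun t => t.2.items)).take 10) := by
  simp only [fallback_search_alt]
  -- 1. the inverted scoring loop is the per-sample score map
  have hrep : (List.replicate ((pvNormalize samples).values.map (fun s => s.items)).length (0:Int))
      = ((pvNormalize samples).values.map pvTriple).map (fun _ => (0:Int)) := by
    rw [List.map_const']
    simp
  rw [hrep, pvLoopInv]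
  have hsc : ((pvNormalize samples).values.map pvTriple).map
        (fun l => 0 + ((PySem.Str.split₀ (PySem.Str.lower query)).map (fun t => pvTermScore t l)).sum)
      = (pvNormalize samples).values.map (pvScore (PySem.Str.split₀ (PySem.Str.lower query))) := by
    rw [List.map_map]
    apply List.map_congr_left
    intro s _
    simp [pvScore, Function.comp_def]
  rw [hsc]
  -- 2. the bucket dict looked up at sc is the index list of samples scoring sc
  have hbucket : ∀ sc : Int,
      (((PySem.List.enumerate ((pvNormalize samples).values.map
            (pvScore (PySem.Str.split₀ (PySem.Str.lower query))))).foldl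
          (fun d p => if 0 < p.2 then d.modify p.2 [] (fun b => b ++ [p.1]) else d)
          (PySem.Dict.empty : PySem.Dict Int (List Int))).getD sc [])
      = ((PySem.List.enumerate ((pvNormalize samples).values.map
            (pvScore (PySem.Str.split₀ (PySem.Str.lower query))))).filter
          (fun p => (p.2 == sc) && decide (0 < p.2))).map (fun p => p.1) := by
    intro sc
    rw [PySem.List.foldl_ite_eq_foldl_filter (p := fun p : Int × Int => 0 < p.2)
        (f := fun d p => d.modify p.2 [] (fun b => b ++ [p.1]))
        (l := PySem.List.enumerate ((pvNormalize samples).values.map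
            (pvScore (PySem.Str.split₀ (PySem.Str.lower query)))))
        (init := (PySem.Dict.empty : PySem.Dict Int (List Int)))]
    rw [show ∀ l : List (Int × Int),
          l.foldl (fun d p => d.modify p.2 [] (fun b => b ++ [p.1]))
            (PySem.Dict.empty : PySem.Dict Int (List Int))
          = (l.map (fun p => (p.2, p.1))).foldl (fun d p => d.modify p.1 [] (fun b => b ++ [p.2]))
            (PySem.Dict.empty : PySem.Dict Int (List Int))
        from fun l => by rw [List.foldl_map]]
    rw [PySem.Dict.getD_foldl_modify_append, List.filter_map, List.map_map, List.filter_filter]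
    simp only [PySem.Dict.getD_empty, List.nil_append, Function.comp_def]
  simp only [hbucket]
  -- 3. the inner loop runs over the items of the bucketed samples
  have hinner : ∀ (out : List (List (String × String))) (b : List Int),
      b.foldl (fun out i => if out.length == 10 then out
          else out ++ [PySem.List.pyGetD ((pvNormalize samples).values.map (fun s => s.items)) i []]) out
      = (b.map (fun i => PySem.List.pyGetD ((pvNormalize samples).values.map (fun s => s.items)) i [])).foldl
          (fun out x => if out.length == 10 then out else out ++ [x]) out := by
    intro out b
    rw [List.foldl_map]
  simp only [hinner]
  -- 4. the two nested loops are one capped fold over the flattened bucket lists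
  rw [show ∀ (L : List Int) (gl : Int → List (List (String × String))),
        L.foldl (fun out sc => (gl sc).foldl (fun out x => if out.length == 10 then out else out ++ [x]) out) []
        = (L.flatMap gl).foldl (fun out x => if out.length == 10 then out else out ++ [x]) []
      from fun L gl => by rw [List.flatMap_def, List.foldl_flatten, List.foldl_map]]
  rw [pvCapFold _ [] (by simp)]
  rw [List.nil_append, List.map_flatMap]
  -- 5. blockwise: bucket sc, mapped to items, is the sc-score class of the scored pairs
  apply congrArg (List.take 10)
  apply List.flatMap_congr
  intro sc hsc
  have h0 : 0 < sc := ((PySem.List.mem_pyRange_neg_one).mp hsc).1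
  -- align the bucket predicate with pvBlock_eq's
  rw [List.filter_congr (q := fun p : Int × Int => (p.2 == sc) && decide (0 < p.2))
      (fun p _ => by by_cases h : p.2 = sc <;> simp [h] <;> omega)]
  exact pvBlock_eq (PySem.Str.split₀ (PySem.Str.lower query)) (pvNormalize samples).values sc h0

theorem pvMain_eq (query : String) (samples : List (String × List (String × String)))
    (hD : ¬ D_fallback_search query samples) :
    fallback_search query samples = fallback_search_alt query samples := by
  rw [pvA_eq query samples hD, pvB_eq query samples]
  by_cases hnil : (pvNormalize samples).values = []
  · rw [hnil]
    simp only [List.filter_nil, List.map_nil]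
    rw [show PySem.List.sorted ([] : List (Int × PySem.Dict String String)) (fun t => t.1) true = [] from rfl]
    simp
  · rw [pvSorted_eq_buckets (fun t : Int × PySem.Dict String String => t.1) _
        (PySem.List.maxD ((pvNormalize samples).values.map
          (pvScore (PySem.Str.split₀ (PySem.Str.lower query)))) (fun x => x) 0) ?hlb ?hub]
    · exact List.map_take ..
    case hlb =>
      intro t ht
      obtain ⟨s, hs, rfl⟩ := List.mem_map.mp ht
      have := List.of_mem_filter hs
      simpa using this
    case hub =>
      intro t ht
      obtain ⟨s, hs, rfl⟩ := List.mem_map.mp ht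
      have hsv : s ∈ (pvNormalize samples).values := List.mem_of_mem_filter hs
      have hy : pvScore (PySem.Str.split₀ (PySem.Str.lower query)) s
          ∈ (pvNormalize samples).values.map (pvScore (PySem.Str.split₀ (PySem.Str.lower query))) :=
        List.mem_map_of_mem hsv
      rw [PySem.List.maxD.eq_1]
      cases hmq : PySem.List.max? ((pvNormalize samples).values.map
          (pvScore (PySem.Str.split₀ (PySem.Str.lower query)))) (fun x => x) with
      | none =>
        exact absurd ((PySem.List.max?_eq_none_iff ..).mp hmq) (by simp [hnil])
      | some m =>
        simpa using PySem.List.max?_isMax hmq _ hy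

-- ===== VERDICT (by name: the statement is the Claim_ definition above) =====
theorem fallback_search_spec : Claim_unchanged_fallback_search := by
  intro query samples _
  unfold Spec_fallback_search
  intro hD
  exact pvMain_eq query samples hD

theorem fallback_search_changed : Claim_changed_fallback_search := by
  unfold Claim_changed_fallback_search; decide
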